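-- pv_equiv track=rewrite | github.com/YawLabs/a2a-webhook-security | reference/python/yawlabs_awsp/_signer.py | _is_lower_hex
-- ===== SOURCE A (Python) =====
-- def _is_lower_hex(s: str) -> bool:
--     for ch in s:
--         c = ord(ch)
--         is_digit = 0x30 <= c <= 0x39
--         is_lower_af = 0x61 <= c <= 0x66
--         if not is_digit and not is_lower_af:
--             return False
--     return True
-- ===== SOURCE B (Python) =====
-- def _is_lower_hex(s: str) -> bool:
--     # Strip every allowed hex digit from both ends; s is all lowercase hex
--     # exactly when nothing is left (a disallowed char anywhere survives the strip).
--     return not s.strip("0123456789abcdef")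
-- ===== Notes on version B (the rewrite author's own statement) =====
-- stated objective: idiomatic
-- what changed: Replaces the per-character ord-range loop with early return by one str.strip call with the sixteen lowercase hex digits as the strip set followed by an emptiness test: hex digits are stripped from both ends and the string is valid iff the residue is empty.
import Mathlib
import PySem

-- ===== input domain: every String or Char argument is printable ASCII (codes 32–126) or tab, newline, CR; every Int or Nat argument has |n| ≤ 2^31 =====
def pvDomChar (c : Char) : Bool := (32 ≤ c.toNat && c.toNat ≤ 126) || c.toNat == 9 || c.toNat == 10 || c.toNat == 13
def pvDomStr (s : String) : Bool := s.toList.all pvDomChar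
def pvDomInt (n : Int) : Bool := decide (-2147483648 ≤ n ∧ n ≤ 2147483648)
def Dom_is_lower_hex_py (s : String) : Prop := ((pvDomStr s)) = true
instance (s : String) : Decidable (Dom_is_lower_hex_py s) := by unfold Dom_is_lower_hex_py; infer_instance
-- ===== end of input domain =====

-- B replaces A's per-character ord-range loop by stripping all hex digits from
-- both ends (str.strip with a character set) and testing for emptiness (idiomatic).

-- ===== PORT A =====
-- the for-loop with its early 'return False' as structural recursion over the characters
def isLowerHexLoop : List Char → Bool
  | [] => true
  | ch :: rest =>
    let c := ch.toNat
    let is_digit := 0x30 ≤ c ∧ c ≤ 0x39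
    let is_lower_af := 0x61 ≤ c ∧ c ≤ 0x66
    if ¬ is_digit ∧ ¬ is_lower_af then false else isLowerHexLoop rest

def is_lower_hex_py (s : String) : Bool := isLowerHexLoop s.toList

-- ===== PORT B =====
-- s.strip("0123456789abcdef") ported by hand (PySem has only whitespace strip):
-- drop chars of the set from the front, then from the back (via reverse); exact
-- transcription of CPython's strip-with-chars on List Char.
def hexChars : List Char := "0123456789abcdef".toList

def stripHex (l : List Char) : List Char :=
  (((l.dropWhile (fun c => hexChars.contains c)).reverse).dropWhile
      (fun c => hexChars.contains c)).reverse

-- 'not stripped' : a string is falsy iff empty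
def is_lower_hex_py_alt (s : String) : Bool := (stripHex s.toList).isEmpty

-- ===== PRECONDITION & SPEC =====
def Spec_is_lower_hex_py (s : String) (out : Bool) : Prop := out = is_lower_hex_py_alt s
instance (s : String) (out : Bool) : Decidable (Spec_is_lower_hex_py s out) := by unfold Spec_is_lower_hex_py; infer_instance

-- ===== CLAIM (what is proved, stated in full; the proofs are below) =====
def Claim_equal_is_lower_hex_py : Prop := ∀ (s : String), Dom_is_lower_hex_py s → Spec_is_lower_hex_py s (is_lower_hex_py s)

-- ===== LEMMAS AND PROOFS =====
-- membership in the hex-digit list ↔ A's numeric range test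
theorem contains_hex_iff (c : Char) :
    hexChars.contains c = true ↔
    ((0x30 ≤ c.toNat ∧ c.toNat ≤ 0x39) ∨ (0x61 ≤ c.toNat ∧ c.toNat ≤ 0x66)) := by
  rw [List.contains_iff_mem]
  constructor
  · intro h
    have he : hexChars =
        ['0','1','2','3','4','5','6','7','8','9','a','b','c','d','e','f'] := by decide
    rw [he] at h
    simp only [List.mem_cons, List.not_mem_nil, or_false] at h
    rcases h with h|h|h|h|h|h|h|h|h|h|h|h|h|h|h|h <;> subst h <;> decide
  · intro h
    have hc : Char.ofNat c.toNat = c := Char.ofNat_toNat c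
    have hv : c.toNat = 48 ∨ c.toNat = 49 ∨ c.toNat = 50 ∨ c.toNat = 51 ∨ c.toNat = 52 ∨ c.toNat = 53 ∨ c.toNat = 54 ∨ c.toNat = 55 ∨ c.toNat = 56 ∨ c.toNat = 57 ∨ c.toNat = 97 ∨ c.toNat = 98 ∨ c.toNat = 99 ∨ c.toNat = 100 ∨ c.toNat = 101 ∨ c.toNat = 102 := by omega
    rcases hv with h|h|h|h|h|h|h|h|h|h|h|h|h|h|h|h <;> (rw [← hc, h]; decide)

-- A's loop returns true iff every character is a hex digit
theorem loop_eq_true_iff (l : List Char) :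
    isLowerHexLoop l = true ↔ ∀ c ∈ l, hexChars.contains c = true := by
  induction l with
  | nil => simp [isLowerHexLoop]
  | cons ch rest ih =>
    by_cases hcond : ¬(0x30 ≤ ch.toNat ∧ ch.toNat ≤ 0x39) ∧ ¬(0x61 ≤ ch.toNat ∧ ch.toNat ≤ 0x66)
    all_goals have hstep : isLowerHexLoop (ch :: rest) =
        if ¬(0x30 ≤ ch.toNat ∧ ch.toNat ≤ 0x39) ∧ ¬(0x61 ≤ ch.toNat ∧ ch.toNat ≤ 0x66)
        then false else isLowerHexLoop rest := rfl
    · have hm : hexChars.contains ch ≠ true := fun hx =>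
        hcond.1 (((contains_hex_iff ch).mp hx).resolve_right hcond.2)
      rw [hstep, if_pos hcond]
      constructor
      · intro h; exact absurd h (by simp)
      · intro h; exact absurd (h ch (List.mem_cons_self)) hm
    · have hm : hexChars.contains ch = true := (contains_hex_iff ch).mpr (by tauto)
      rw [hstep, if_neg hcond, ih]
      constructor
      · intro h c hc
        rcases List.mem_cons.mp hc with h1 | h1
        · exact h1 ▸ hm
        · exact h c h1
      · intro h c hc; exact h c (List.mem_cons_of_mem _ hc)

-- B's strip leaves nothing iff every character is a hex digit
theorem strip_empty_iff (l : List Char) :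
    (stripHex l).isEmpty = true ↔ ∀ c ∈ l, hexChars.contains c = true := by
  unfold stripHex
  rw [List.isEmpty_iff, List.reverse_eq_nil_iff, List.dropWhile_eq_nil_iff]
  constructor
  · intro h c hc
    by_cases hd : ∀ x ∈ l.dropWhile (fun c => hexChars.contains c), hexChars.contains x = true
    · -- every dropped-to char is hex, and every takeWhile char is hex by construction
      rcases (List.mem_append.mp (by
        rw [List.takeWhile_append_dropWhile] ; exact hc :
          c ∈ l.takeWhile (fun c => hexChars.contains c) ++
            l.dropWhile (fun c => hexChars.contains c))) with h1 | h1
      · exact List.mem_takeWhile_imp h1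
      · exact hd c h1
    · rw [not_forall] at hd
      obtain ⟨x, hx2⟩ := hd
      rw [Classical.not_imp] at hx2
      obtain ⟨hx, hxf⟩ := hx2
      exact absurd (h x (List.mem_reverse.mpr hx)) hxf
  · intro h c hc
    exact h c (List.Sublist.mem (List.mem_reverse.mp hc) (List.dropWhile_sublist _))

-- ===== VERDICT (by name: the statement is the Claim_ definition above) =====
theorem is_lower_hex_py_spec : Claim_equal_is_lower_hex_py := by
  intro s _
  unfold Spec_is_lower_hex_py is_lower_hex_py is_lower_hex_py_alt
  rw [Bool.eq_iff_iff, loop_eq_true_iff, strip_empty_iff]
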